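-- pv_equiv track=rewrite | github.com/JulieCJWu/siWalk | src/parse_alignment_of_a_contig.py | get_extra_count
-- ===== SOURCE A (Python) =====
-- def get_extra_count(pos, d, param):
--   '''
--   Sum DicerCall-nt frequencies within ±Dicer_relaxation positions of *pos*.
--
--   @pos   : the central phase position.
--   @d     : Watson or Crick pos-freq dictionary.
--   @param : [cycle, DicerCall, Dicer_relaxation].
--   '''
--   cycle, DicerCall, Dicer_relaxation = param
--   f = Dicer_relaxation
--   extra_count = 0
--   for i in range(pos - f, pos + f + 1):
--     if i == pos: continue
--     if i in d.keys(): extra_count += d[i]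
--   return extra_count
-- ===== SOURCE B (Python) =====
-- def get_extra_count(pos, d, param):
--   cycle, DicerCall, Dicer_relaxation = param
--   f = Dicer_relaxation
--   return sum(v for k, v in d.items() if pos - f <= k <= pos + f and k != pos)
-- ===== Notes on version B (the rewrite author's own statement) =====
-- stated objective: idiomatic
-- what changed: Instead of looping over the index window range(pos-f, pos+f+1) and probing the dict for each index, B makes one pass over the dict's own items and sums the values whose key falls in the window (excluding pos).
import Mathlib
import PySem

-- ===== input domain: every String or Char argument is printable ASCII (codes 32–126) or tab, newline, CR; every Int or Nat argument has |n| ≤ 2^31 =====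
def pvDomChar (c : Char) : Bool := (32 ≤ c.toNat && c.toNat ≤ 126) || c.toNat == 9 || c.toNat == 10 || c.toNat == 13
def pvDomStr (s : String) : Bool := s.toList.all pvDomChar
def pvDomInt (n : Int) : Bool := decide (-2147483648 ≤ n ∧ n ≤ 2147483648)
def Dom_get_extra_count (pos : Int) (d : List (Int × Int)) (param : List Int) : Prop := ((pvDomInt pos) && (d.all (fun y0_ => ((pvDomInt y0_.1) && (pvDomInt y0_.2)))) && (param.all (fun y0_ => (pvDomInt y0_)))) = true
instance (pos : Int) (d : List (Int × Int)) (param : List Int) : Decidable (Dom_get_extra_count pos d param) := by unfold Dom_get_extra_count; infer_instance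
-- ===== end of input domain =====

-- B replaces A's scan over the index window (with a dict probe per index) by one pass
-- over the dictionary's own items filtered by the window: a more idiomatic traversal.


-- ===== PORT A =====
-- first-match lookup in the association list (= Python dict lookup d[i])
def pvLookup : List (Int × Int) → Int → Option Int
  | [], _ => none
  | (k, v) :: t, i => if k = i then some v else pvLookup t i

def get_extra_count (pos : Int) (d : List (Int × Int)) (param : List Int) : Int :=
  let f := PySem.List.pyGetD param 2 0
  (PySem.List.pyRange (pos - f) (pos + f + 1) 1).foldl
    (fun acc i =>
      if i = pos then acc
      else match pvLookup d i with
        | some v => acc + v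
        | none => acc) 0

-- ===== PORT B =====
def get_extra_count_alt (pos : Int) (d : List (Int × Int)) (param : List Int) : Int :=
  let f := PySem.List.pyGetD param 2 0
  ((d.filter (fun kv => decide (pos - f ≤ kv.1) && decide (kv.1 ≤ pos + f) && (kv.1 != pos))).map (·.2)).sum

-- ===== PRECONDITION & SPEC =====
-- Pre_ requires param to have exactly 3 elements (Python's unpacking raises ValueError
-- otherwise) and the association list to have distinct keys (a Python dict can never
-- carry duplicate keys, so lists with duplicates represent no actual dict input).
def Pre_get_extra_count (pos : Int) (d : List (Int × Int)) (param : List Int) : Prop :=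
  param.length = 3 ∧ (d.map Prod.fst).Nodup
instance (pos : Int) (d : List (Int × Int)) (param : List Int) : Decidable (Pre_get_extra_count pos d param) := by unfold Pre_get_extra_count; infer_instance

def pvWitness_get_extra_count : Int × (List (Int × Int)) × List Int := (0, [(1, 5), (-1, 3)], [1, 21, 1])

def Spec_get_extra_count (pos : Int) (d : List (Int × Int)) (param : List Int) (out : Int) : Prop := out = get_extra_count_alt pos d param
instance (pos : Int) (d : List (Int × Int)) (param : List Int) (out : Int) : Decidable (Spec_get_extra_count pos d param out) := by unfold Spec_get_extra_count; infer_instance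

-- ===== CLAIM (what is proved, stated in full; the proofs are below) =====
def Claim_equal_get_extra_count : Prop := ∀ (pos : Int) (d : List (Int × Int)) (param : List Int), Dom_get_extra_count pos d param → Pre_get_extra_count pos d param → Spec_get_extra_count pos d param (get_extra_count pos d param)

-- ===== LEMMAS AND PROOFS =====

-- A's loop body as a pure function of the index
def pvStep (pos : Int) (d : List (Int × Int)) (i : Int) : Int :=
  if i = pos then 0 else (pvLookup d i).getD 0

theorem foldl_step_eq_sum (pos : Int) (d : List (Int × Int)) (R : List Int) (c : Int) :
    R.foldl (fun acc i =>
      if i = pos then acc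
      else match pvLookup d i with
        | some v => acc + v
        | none => acc) c = c + (R.map (pvStep pos d)).sum := by
  induction R generalizing c with
  | nil => simp
  | cons r t ih =>
    simp only [List.foldl_cons, List.map_cons, List.sum_cons, ih]
    unfold pvStep
    split_ifs with h
    · simp
    · cases hL : pvLookup d r <;> simp <;> ring

theorem sum_indicator (R : List Int) (hR : R.Nodup) (k v pos : Int) :
    (R.map (fun i => if i = k ∧ i ≠ pos then v else 0)).sum
      = if k ∈ R ∧ k ≠ pos then v else 0 := by
  induction R with
  | nil => simp
  | cons r t ih =>
    have hnd := hR
    simp only [List.nodup_cons] at hnd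
    simp only [List.map_cons, List.sum_cons, ih hnd.2, List.mem_cons]
    by_cases hrk : r = k
    · subst hrk
      have : r ∉ t := hnd.1
      by_cases hp : r = pos <;> simp [hp, this]
    · simp [hrk, Ne.symm hrk]

theorem pvLookup_not_mem (t : List (Int × Int)) (i : Int)
    (h : i ∉ t.map Prod.fst) : pvLookup t i = none := by
  induction t with
  | nil => rfl
  | cons kv t' ih =>
    obtain ⟨k', v'⟩ := kv
    simp only [List.map_cons, List.mem_cons] at h
    push Not at h
    simp only [pvLookup, if_neg (fun hh : k' = i => h.1 hh.symm)]
    exact ih h.2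

theorem sum_map_add (R : List Int) (g h : Int → Int) :
    (R.map (fun i => g i + h i)).sum = (R.map g).sum + (R.map h).sum := by
  induction R with
  | nil => simp
  | cons r t ih => simp only [List.map_cons, List.sum_cons, ih]; ring

theorem sum_step_eq_filter (pos : Int) (d : List (Int × Int)) (R : List Int)
    (hR : R.Nodup) (hd : (d.map Prod.fst).Nodup) :
    (R.map (pvStep pos d)).sum
      = ((d.filter (fun kv => decide (kv.1 ∈ R) && (kv.1 != pos))).map (·.2)).sum := by
  induction d with
  | nil =>
    have h0 : ∀ i ∈ R, pvStep pos ([] : List (Int × Int)) i = 0 := by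
      intro i _; unfold pvStep pvLookup; split_ifs <;> simp
    rw [List.map_congr_left h0]
    simp
  | cons kv t ih =>
    obtain ⟨k, v⟩ := kv
    simp only [List.map_cons, List.nodup_cons] at hd
    have hpt : ∀ i, pvStep pos ((k, v) :: t) i
        = (if i = k ∧ i ≠ pos then v else 0) + pvStep pos t i := by
      intro i
      unfold pvStep
      by_cases hik : i = k
      · have hnone : pvLookup t k = none := pvLookup_not_mem t k hd.1
        by_cases hp : i = pos <;> simp [pvLookup, hik, hnone]
      · have hki : ¬ k = i := fun hh => hik hh.symm
        simp [pvLookup, hki, hik]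
    have hsplit : (R.map (pvStep pos ((k, v) :: t))).sum
        = (R.map (fun i => if i = k ∧ i ≠ pos then v else 0)).sum + (R.map (pvStep pos t)).sum := by
      rw [List.map_congr_left (fun i (_ : i ∈ R) => hpt i)]
      exact sum_map_add R _ _
    rw [hsplit, sum_indicator R hR k v pos, ih hd.2]
    by_cases hm : k ∈ R ∧ k ≠ pos
    · have hb : (decide (k ∈ R) && (k != pos)) = true := by
        simp [hm.1, bne_iff_ne, hm.2]
      simp [hm]
    · have hb : (decide (k ∈ R) && (k != pos)) = false := by
        by_cases h1 : k ∈ R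
        · have h2 : k = pos := by by_contra h; exact hm ⟨h1, h⟩
          simp [h2]
        · simp [h1]
      simp [hb, hm]

-- ===== VERDICT (by name: the statement is the Claim_ definition above) =====
theorem get_extra_count_spec : Claim_equal_get_extra_count := by
  intro pos d param _ hpre
  unfold Spec_get_extra_count get_extra_count get_extra_count_alt
  set f := PySem.List.pyGetD param 2 0 with hf
  set R := PySem.List.pyRange (pos - f) (pos + f + 1) 1 with hRdef
  rw [foldl_step_eq_sum, zero_add,
      sum_step_eq_filter pos d R (hRdef ▸ PySem.List.nodup_pyRange_one _ _) hpre.2]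
  refine congrArg _ (congrArg _ (List.filter_congr ?_))
  intro kv _
  have hmem : kv.1 ∈ R ↔ pos - f ≤ kv.1 ∧ kv.1 < pos + f + 1 := by
    rw [hRdef]; exact PySem.List.mem_pyRange_one
  by_cases h1 : pos - f ≤ kv.1 <;> by_cases h2 : kv.1 ≤ pos + f <;>
    simp [hmem, h1, h2]
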